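-- pv_equiv track=rewrite | github.com/MikeyBeez/engrams | scripts/steering_gamma_sweep.py | check_coherence
-- ===== SOURCE A (Python) =====
-- def check_coherence(response, prompt):
--     """Simple coherence check - look for signs of degeneration."""
--     generated = response[len(prompt):]
--
--     # Check for repetition
--     words = generated.split()
--     if len(words) > 5:
--         # Check if any word repeats more than 3 times in a row
--         for i in range(len(words) - 3):
--             if words[i] == words[i+1] == words[i+2] == words[i+3]:
--                 return False
--
--     # Check for very short or empty
--     if len(generated.strip()) < 5:
--         return False
--
--     return True
-- ===== SOURCE B (Python) =====
-- def check_coherence(response, prompt):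
--     """Coherence check via run-length encoding of consecutive words."""
--     generated = response[len(prompt):]
--
--     words = generated.split()
--     if len(words) > 5:
--         # run-length encode maximal blocks of equal consecutive words
--         runs = []
--         i = 0
--         while i < len(words):
--             j = i
--             while j < len(words) and words[j] == words[i]:
--                 j += 1
--             runs.append(j - i)
--             i = j
--         if any(n >= 4 for n in runs):
--             return False
--
--     return len(generated.strip()) >= 5
-- ===== Notes on version B (the rewrite author's own statement) =====
-- stated objective: alternative
-- what changed: Replaces the indexed 4-wide sliding-window comparison with a run-length encoding of maximal blocks of equal consecutive words, flagging degeneration when any block has length >= 4; the trailing short-output check becomes a single boolean return.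
import Mathlib
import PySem

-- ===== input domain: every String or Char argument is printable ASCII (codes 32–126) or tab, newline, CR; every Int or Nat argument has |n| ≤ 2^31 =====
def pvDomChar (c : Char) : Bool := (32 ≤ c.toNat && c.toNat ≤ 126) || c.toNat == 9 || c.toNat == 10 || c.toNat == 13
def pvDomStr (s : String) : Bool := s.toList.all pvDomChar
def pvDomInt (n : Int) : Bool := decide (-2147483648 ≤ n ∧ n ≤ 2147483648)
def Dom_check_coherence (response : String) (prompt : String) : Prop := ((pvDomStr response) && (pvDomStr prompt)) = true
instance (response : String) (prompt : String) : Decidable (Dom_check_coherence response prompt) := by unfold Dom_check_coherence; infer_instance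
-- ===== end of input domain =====

-- B replaces A's indexed 4-wide sliding-window scan by a run-length encoding of maximal
-- blocks of equal consecutive words (degenerate iff some block has length ≥ 4): an
-- alternative decomposition of the same O(n) check.

-- ===== PORT A =====
def check_coherence (response : String) (prompt : String) : Bool :=
  let generated := PySem.Str.slice response (some (PySem.Str.len prompt)) none
  let words := PySem.Str.split₀ generated
  let rep :=
    if 5 < words.length then
      -- for i in range(len(words) - 3): if words[i] == words[i+1] == words[i+2] == words[i+3]: return False
      (PySem.List.pyRange 0 ((words.length : Int) - 3)).any (fun i =>
        (PySem.List.pyGet? words i == PySem.List.pyGet? words (i+1)) &&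
        (PySem.List.pyGet? words (i+1) == PySem.List.pyGet? words (i+2)) &&
        (PySem.List.pyGet? words (i+2) == PySem.List.pyGet? words (i+3)))
    else false
  if rep then false
  else if PySem.Str.len (PySem.Str.strip generated) < 5 then false
  else true

-- ===== PORT B =====
-- run-length encoding of maximal blocks of consecutive equal words (the inner while
-- loop of Source B that advances j over the block is the takeWhile/dropWhile split)
def runsOf : List String → List Nat
  | [] => []
  | w :: ws =>
      ((ws.takeWhile (· == w)).length + 1) :: runsOf (ws.dropWhile (· == w))
termination_by l => l.length
decreasing_by
  simpa [Nat.lt_succ_iff] using List.length_dropWhile_le (· == w) ws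

def check_coherence_alt (response : String) (prompt : String) : Bool :=
  let generated := PySem.Str.slice response (some (PySem.Str.len prompt)) none
  let words := PySem.Str.split₀ generated
  if 5 < words.length then
    if (runsOf words).any (fun n => 4 ≤ n) then false
    else decide (5 ≤ PySem.Str.len (PySem.Str.strip generated))
  else decide (5 ≤ PySem.Str.len (PySem.Str.strip generated))

-- ===== PRECONDITION & SPEC =====
def Spec_check_coherence (response : String) (prompt : String) (out : Bool) : Prop := out = check_coherence_alt response prompt
instance (response : String) (prompt : String) (out : Bool) : Decidable (Spec_check_coherence response prompt out) := by unfold Spec_check_coherence; infer_instance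

-- ===== CLAIM (what is proved, stated in full; the proofs are below) =====
def Claim_equal_check_coherence : Prop := ∀ (response : String) (prompt : String), Dom_check_coherence response prompt → Spec_check_coherence response prompt (check_coherence response prompt)

-- ===== LEMMAS AND PROOFS =====

-- the common reference predicate: some word repeats 4 times in a row
def hasFour : List String → Bool
  | a :: b :: c :: d :: rest => (a == b && b == c && c == d) || hasFour (b :: c :: d :: rest)
  | _ => false

-- A's sliding-window scan computes hasFour
lemma anyQuad_eq_hasFour (l : List String) :
    ((List.range (l.length - 3)).any (fun k =>
      (l[k]? == l[k+1]?) && (l[k+1]? == l[k+2]?) && (l[k+2]? == l[k+3]?))) = hasFour l := by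
  induction l with
  | nil => simp [hasFour]
  | cons a t ih =>
    rcases t with _ | ⟨b, t2⟩
    · simp [hasFour]
    rcases t2 with _ | ⟨c, t3⟩
    · simp [hasFour]
    rcases t3 with _ | ⟨d, rest⟩
    · simp [hasFour]
    have hl : (a::b::c::d::rest).length - 3 = rest.length + 1 := by simp
    have hl' : (b::c::d::rest).length - 3 = rest.length := by simp
    rw [hl, List.range_succ_eq_map, List.any_cons, List.any_map]
    have hshift : ((fun k =>
        ((a::b::c::d::rest)[k]? == (a::b::c::d::rest)[k+1]?) &&
        ((a::b::c::d::rest)[k+1]? == (a::b::c::d::rest)[k+2]?) &&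
        ((a::b::c::d::rest)[k+2]? == (a::b::c::d::rest)[k+3]?)) ∘ Nat.succ)
      = (fun k =>
        ((b::c::d::rest)[k]? == (b::c::d::rest)[k+1]?) &&
        ((b::c::d::rest)[k+1]? == (b::c::d::rest)[k+2]?) &&
        ((b::c::d::rest)[k+2]? == (b::c::d::rest)[k+3]?)) := by
      funext k
      simp only [Function.comp, Nat.succ_eq_add_one]
      have e0 : (a::b::c::d::rest)[k+1]? = (b::c::d::rest)[k]? := List.getElem?_cons_succ
      have e1 : (a::b::c::d::rest)[k+1+1]? = (b::c::d::rest)[k+1]? := List.getElem?_cons_succ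
      have e2 : (a::b::c::d::rest)[k+1+2]? = (b::c::d::rest)[k+2]? := by
        rw [show k+1+2 = (k+2)+1 from by omega]; exact List.getElem?_cons_succ
      have e3 : (a::b::c::d::rest)[k+1+3]? = (b::c::d::rest)[k+3]? := by
        rw [show k+1+3 = (k+3)+1 from by omega]; exact List.getElem?_cons_succ
      rw [e0, e1, e2, e3]
    rw [hl'] at ih
    rw [hshift, ih]
    simp only [hasFour]
    simp

-- B's run-length encoding computes hasFour
-- prepending a word different from the head leaves hasFour unchanged
lemma hasFour_cons_of_ne (w : String) (r : List String)
    (h : ∀ x, r.head? = some x → (x == w) = false) :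
    hasFour (w :: r) = hasFour r := by
  rcases r with _ | ⟨a, r2⟩
  · simp [hasFour]
  have ha : (w == a) = false := by
    have := h a rfl
    simp at this ⊢
    exact fun e => this e.symm
  rcases r2 with _ | ⟨b, r3⟩
  · simp [hasFour]
  rcases r3 with _ | ⟨c, r4⟩
  · simp [hasFour]
  simp [hasFour, ha]

lemma hasFour_two_cons (w : String) (r : List String)
    (h : ∀ x, r.head? = some x → (x == w) = false) :
    hasFour (w :: w :: r) = hasFour r := by
  rcases hr : r with _ | ⟨a, r2⟩
  · simp [hasFour]
  have ha : (w == a) = false := by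
    have := h a (by rw [hr]; rfl)
    simp at this ⊢
    exact fun e => this e.symm
  rcases r2 with _ | ⟨b, r3⟩
  · simp [hasFour]
  simp only [hasFour, ha]
  have := hasFour_cons_of_ne w (a :: b :: r3) (by rw [← hr]; exact h)
  simpa [hasFour, ha] using this

lemma hasFour_three_cons (w : String) (r : List String)
    (h : ∀ x, r.head? = some x → (x == w) = false) :
    hasFour (w :: w :: w :: r) = hasFour r := by
  rcases hr : r with _ | ⟨a, r2⟩
  · simp [hasFour]
  have ha : (w == a) = false := by
    have := h a (by rw [hr]; rfl)
    simp at this ⊢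
    exact fun e => this e.symm
  simp only [hasFour, ha]
  have := hasFour_two_cons w (a :: r2) (by rw [← hr]; exact h)
  simpa [hasFour, ha] using this

-- one step of the run-length encoding against hasFour
lemma runs_step (w : String) (t r : List String)
    (hmem : ∀ x ∈ t, x = w)
    (hhead : ∀ x, r.head? = some x → (x == w) = false) :
    (decide (4 ≤ t.length + 1) || hasFour r) = hasFour (w :: (t ++ r)) := by
  rcases t with _ | ⟨x1, t1⟩
  · simpa using (hasFour_cons_of_ne w r hhead).symm
  rcases t1 with _ | ⟨x2, t2⟩
  · have hx1 : x1 = w := hmem x1 (by simp)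
    rw [hx1]
    simpa using (hasFour_two_cons w r hhead).symm
  rcases t2 with _ | ⟨x3, t3⟩
  · have hx1 : x1 = w := hmem x1 (by simp)
    have hx2 : x2 = w := hmem x2 (by simp)
    rw [hx1, hx2]
    simpa using (hasFour_three_cons w r hhead).symm
  · have hx1 : x1 = w := hmem x1 (by simp)
    have hx2 : x2 = w := hmem x2 (by simp)
    have hx3 : x3 = w := hmem x3 (by simp)
    rw [hx1, hx2, hx3]
    simp [hasFour]

lemma runsOf_eq_hasFour (l : List String) :
    ((runsOf l).any (fun n => 4 ≤ n)) = hasFour l := by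
  induction l using runsOf.induct with
  | case1 => simp [runsOf, hasFour]
  | case2 w ws ih =>
    rw [runsOf, List.any_cons, ih]
    have hws : ws.takeWhile (· == w) ++ ws.dropWhile (· == w) = ws :=
      List.takeWhile_append_dropWhile
    have hhead : ∀ x, (ws.dropWhile (· == w)).head? = some x → (x == w) = false := by
      intro x hx
      have hh := List.head?_dropWhile_not (· == w) ws
      rw [hx] at hh
      exact hh
    have hmem : ∀ x ∈ ws.takeWhile (· == w), x = w := by
      intro x hx
      have := List.mem_takeWhile_imp hx
      simpa using this
    exact (runs_step w _ _ hmem hhead).trans (by rw [hws])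

-- A's pyRange/pyGet? loop in Nat form
lemma pyAnyQuad_eq (l : List String) :
    ((PySem.List.pyRange 0 ((l.length : Int) - 3)).any (fun i =>
        (PySem.List.pyGet? l i == PySem.List.pyGet? l (i+1)) &&
        (PySem.List.pyGet? l (i+1) == PySem.List.pyGet? l (i+2)) &&
        (PySem.List.pyGet? l (i+2) == PySem.List.pyGet? l (i+3)))) =
    ((List.range (l.length - 3)).any (fun k =>
      (l[k]? == l[k+1]?) && (l[k+1]? == l[k+2]?) && (l[k+2]? == l[k+3]?))) := by
  by_cases h : l.length ≤ 3
  · rw [PySem.List.pyRange_one_eq_nil (by omega)]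
    have : l.length - 3 = 0 := by omega
    rw [this]
    simp
  · have h : 3 < l.length := by omega
    have hcast : (l.length : Int) - 3 = ((l.length - 3 : Nat) : Int) := by omega
    rw [hcast, PySem.List.pyRange_zero_natCast, List.any_map]
    congr 1
    funext k
    have h1 : (k : Int) + 1 = ((k+1 : Nat) : Int) := by push_cast; ring
    have h2 : (k : Int) + 2 = ((k+2 : Nat) : Int) := by push_cast; ring
    have h3 : (k : Int) + 3 = ((k+3 : Nat) : Int) := by push_cast; ring
    simp only [Function.comp, h1, h2, h3, PySem.List.pyGet?_natCast]

-- combining lemma: the final assembly of both functions, over abstract words and strip-length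
lemma combine (words : List String) (s : Int) :
    (if (if 5 < words.length then
          (PySem.List.pyRange 0 ((words.length : Int) - 3)).any (fun i =>
            (PySem.List.pyGet? words i == PySem.List.pyGet? words (i+1)) &&
            (PySem.List.pyGet? words (i+1) == PySem.List.pyGet? words (i+2)) &&
            (PySem.List.pyGet? words (i+2) == PySem.List.pyGet? words (i+3)))
        else false)
     then false else if s < 5 then false else true)
    = (if 5 < words.length then
        if (runsOf words).any (fun n => 4 ≤ n) then false else decide (5 ≤ s)
      else decide (5 ≤ s)) := by
  have htail : (if s < 5 then false else true) = decide (5 ≤ s) := by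
    by_cases h5 : s < 5
    · rw [if_pos h5]; simp; omega
    · rw [if_neg h5]; simp; omega
  by_cases hlen : 5 < words.length
  · rw [if_pos hlen, if_pos hlen]
    rw [pyAnyQuad_eq, anyQuad_eq_hasFour, ← runsOf_eq_hasFour]
    by_cases hq : (runsOf words).any (fun n => 4 ≤ n) = true
    · rw [hq, if_pos rfl, if_pos rfl]
    · rw [Bool.not_eq_true] at hq
      rw [hq]
      simpa using htail
  · rw [if_neg hlen, if_neg hlen, if_neg (by simp)]
    exact htail

-- ===== VERDICT (by name: the statement is the Claim_ definition above) =====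
theorem check_coherence_spec : Claim_equal_check_coherence := by
  intro response prompt _
  show check_coherence response prompt = check_coherence_alt response prompt
  unfold check_coherence check_coherence_alt
  exact combine _ _
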